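-- pv_equiv track=rewrite | github.com/pouya-mhb/python-practice | TodoList.py | remove_task
-- ===== SOURCE A (Python) =====
-- def remove_task(task, task_id):
--     if task is None:
--         return None
--     for i in range(len(task)):
--         if i == task_id:
--             del task[i]
--             return task
--     return task
-- ===== SOURCE B (Python) =====
-- def remove_task(task, task_id):
--     if task is None:
--         return None
--     if 0 <= task_id < len(task):
--         del task[task_id]
--     return task
-- ===== Notes on version B (the rewrite author's own statement) =====
-- stated objective: simpler
-- what changed: Replaces A's linear scan for an index equal to task_id with a direct bounds check and a single deletion at that index.
import Mathlib
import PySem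

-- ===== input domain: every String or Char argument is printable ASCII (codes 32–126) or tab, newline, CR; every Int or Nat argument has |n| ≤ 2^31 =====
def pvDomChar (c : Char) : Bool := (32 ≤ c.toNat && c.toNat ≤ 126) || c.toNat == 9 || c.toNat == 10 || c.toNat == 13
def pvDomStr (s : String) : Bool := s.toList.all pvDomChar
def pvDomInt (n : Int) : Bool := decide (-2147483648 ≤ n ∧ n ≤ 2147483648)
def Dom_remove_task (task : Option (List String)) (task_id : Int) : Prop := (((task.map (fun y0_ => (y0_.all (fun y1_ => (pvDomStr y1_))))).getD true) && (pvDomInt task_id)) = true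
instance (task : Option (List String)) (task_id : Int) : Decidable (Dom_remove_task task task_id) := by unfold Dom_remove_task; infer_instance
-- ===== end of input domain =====

-- B replaces A's linear scan for i == task_id with a direct bounds check and one deletion (simpler); both Pythons mutate the list in place identically, the proof is about the return value.
-- ===== PORT A =====
-- for i in range(len(task)): if i == task_id: del task[i]; return task
def removeLoopA (l : List String) (tid : Int) (i n : Nat) : List String :=
  if _h : i < n then
    if (i : Int) = tid then l.eraseIdx i else removeLoopA l tid (i + 1) n
  else l
termination_by n - i

def remove_task (task : Option (List String)) (task_id : Int) : Option (List String) :=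
  match task with
  | none => none
  | some l => some (removeLoopA l task_id 0 l.length)

-- ===== PORT B =====
def remove_task_alt (task : Option (List String)) (task_id : Int) : Option (List String) :=
  match task with
  | none => none
  | some l =>
      if 0 ≤ task_id ∧ task_id < (l.length : Int) then some (l.eraseIdx task_id.toNat)
      else some l

-- ===== PRECONDITION & SPEC =====
def Spec_remove_task (task : Option (List String)) (task_id : Int) (out : Option (List String)) : Prop := out = remove_task_alt task task_id
instance (task : Option (List String)) (task_id : Int) (out : Option (List String)) : Decidable (Spec_remove_task task task_id out) := by unfold Spec_remove_task; infer_instance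

-- ===== CLAIM (what is proved, stated in full; the proofs are below) =====
def Claim_equal_remove_task : Prop := ∀ (task : Option (List String)) (task_id : Int), Dom_remove_task task task_id → Spec_remove_task task task_id (remove_task task task_id)

-- ===== LEMMAS AND PROOFS =====

theorem removeLoopA_eq (l : List String) (tid : Int) (n : Nat) :
    ∀ k i, n - i ≤ k →
      removeLoopA l tid i n =
        if (i : Int) ≤ tid ∧ tid < (n : Int) then l.eraseIdx tid.toNat else l := by
  intro k
  induction k with
  | zero =>
      intro i h
      unfold removeLoopA
      have hn : ¬ i < n := by omega
      simp only [hn, dite_false]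
      have : ¬ ((i : Int) ≤ tid ∧ tid < (n : Int)) := by
        rintro ⟨h1, h2⟩; omega
      simp [this]
  | succ k ih =>
      intro i h
      unfold removeLoopA
      by_cases hin : i < n
      · simp only [hin, dite_true]
        by_cases heq : (i : Int) = tid
        · have ht : tid.toNat = i := by omega
          have hc : (i : Int) ≤ tid ∧ tid < (n : Int) := by constructor <;> omega
          simp [heq, hc, ht]
        · rw [ih (i + 1) (by omega)]
          simp only [heq, if_false]
          have hiff : ((((i : Nat) + 1 : Nat) : Int) ≤ tid ∧ tid < (n : Int)) ↔
              ((i : Int) ≤ tid ∧ tid < (n : Int)) := by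
            constructor
            · rintro ⟨h1, h2⟩; exact ⟨by push_cast at h1; omega, h2⟩
            · rintro ⟨h1, h2⟩; exact ⟨by push_cast; omega, h2⟩
          rw [if_congr hiff rfl rfl]
      · simp only [hin, dite_false]
        have : ¬ ((i : Int) ≤ tid ∧ tid < (n : Int)) := by
          rintro ⟨h1, h2⟩; omega
        simp [this]

-- ===== VERDICT (by name: the statement is the Claim_ definition above) =====
theorem remove_task_spec : Claim_equal_remove_task := by
  intro task task_id _
  unfold Spec_remove_task remove_task remove_task_alt
  cases task with
  | none => rfl
  | some l =>
      simp only
      rw [removeLoopA_eq l task_id l.length l.length 0 (by omega)]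
      push_cast
      split_ifs <;> rfl
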